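-- pv_equiv track=rewrite | github.com/huyblue17/TDTU_Python | Assigments/522H0077_522H0025.py | longest_contiguous_odd_rows
-- ===== SOURCE A (Python) =====
-- def longest_contiguous_odd_rows(matrix):
--     rows = []
--     max_length = 0
--     for i in range(len(matrix)):
--         current_row = []
--         for j in range(len(matrix[i])):
--             if matrix[i][j] % 2 != 0:
--                 current_row.append(matrix[i][j])
--             else:
--                 if len(current_row) > max_length:
--                     max_length = len(current_row)
--                     rows = [matrix[i]]
--                 elif len(current_row) == max_length:
--                     rows.append(matrix[i])
--                 current_row = []
--         if len(current_row) > max_length: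
--             max_length = len(current_row)
--             rows = [matrix[i]]
--         elif len(current_row) == max_length:
--             rows.append(matrix[i])
--     return rows
-- ===== SOURCE B (Python) =====
-- def longest_contiguous_odd_rows(matrix):
--     # Length of the longest contiguous run of odd numbers in one row.
--     def max_odd_run(row):
--         best = 0
--         cur = 0
--         for x in row:
--             cur = cur + 1 if x % 2 != 0 else 0
--             best = max(best, cur)
--         return best
--
--     best = 0
--     for row in matrix:
--         best = max(best, max_odd_run(row))
--     return [row for row in matrix if max_odd_run(row) == best]
-- ===== Notes on version B (the rewrite author's own statement) =====
-- stated objective: simpler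
-- what changed: Replaces A's online scan with mutating result-list resets/appends at every even element by a per-row 'longest contiguous odd run' helper, a fold for the global maximum, and a filter of the rows attaining it.
-- intended difference: On matrices where the globally longest odd run is realised more than once inside a single row (including the all-even case, where every element boundary realises the zero-length run), A appends that row once per realisation and so returns duplicates, e.g. A([[1,2,1]]) = [[1,2,1],[1,2,1]]; B lists each qualifying row exactly once, which is the intended 'rows with the longest run' result. — e.g. on longest_contiguous_odd_rows([[1, 2, 1]]): A returns [[1, 2, 1], [1, 2, 1]], B returns [[1, 2, 1]]
import Mathlib
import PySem

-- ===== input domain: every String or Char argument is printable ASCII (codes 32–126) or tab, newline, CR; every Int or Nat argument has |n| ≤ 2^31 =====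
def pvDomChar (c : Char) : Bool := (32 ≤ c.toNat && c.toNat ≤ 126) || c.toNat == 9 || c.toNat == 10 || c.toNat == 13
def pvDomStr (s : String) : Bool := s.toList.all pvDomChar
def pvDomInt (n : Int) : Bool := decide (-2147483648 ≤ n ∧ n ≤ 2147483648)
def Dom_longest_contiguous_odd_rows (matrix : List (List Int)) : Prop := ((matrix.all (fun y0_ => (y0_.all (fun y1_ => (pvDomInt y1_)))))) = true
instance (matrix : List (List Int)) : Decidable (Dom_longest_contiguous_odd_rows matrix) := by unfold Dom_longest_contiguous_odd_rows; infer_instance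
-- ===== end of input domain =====

-- B: compute each row's longest contiguous odd run, the global maximum, and filter
-- the rows attaining it (objective: simpler).  Where the longest run is realised
-- several times inside one row, A returns that row with duplicates; B lists it once
-- (stated as the intended difference D_ below).

-- ===== PORT A =====
-- A's online scan: inner loop over a row, state (current_row, rows, max_length);
-- the even branch and the row-end step update (rows, max_length) and reset current_row.
def longest_contiguous_odd_rows (matrix : List (List Int)) : List (List Int) :=
  (matrix.foldl
    (fun (s : List (List Int) × Int) row =>
      let t := row.foldl
        (fun (t : List Int × List (List Int) × Int) x =>
          if PySem.Int.mod x 2 ≠ 0 then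
            (t.1 ++ [x], t.2.1, t.2.2)
          else
            if (t.1.length : Int) > t.2.2 then ([], [row], (t.1.length : Int))
            else if (t.1.length : Int) = t.2.2 then ([], t.2.1 ++ [row], t.2.2)
            else ([], t.2.1, t.2.2))
        ([], s.1, s.2)
      if (t.1.length : Int) > t.2.2 then ([row], (t.1.length : Int))
      else if (t.1.length : Int) = t.2.2 then (t.2.1 ++ [row], t.2.2)
      else (t.2.1, t.2.2))
    ([], 0)).1

-- ===== PORT B =====
-- length of the longest contiguous run of odd numbers in one row
def pvMaxOddRun (row : List Int) : Int :=
  (row.foldl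
    (fun (s : Int × Int) x =>
      let cur := if PySem.Int.mod x 2 ≠ 0 then s.2 + 1 else 0
      (max s.1 cur, cur))
    (0, 0)).1

def longest_contiguous_odd_rows_alt (matrix : List (List Int)) : List (List Int) :=
  let best := matrix.foldl (fun b row => max b (pvMaxOddRun row)) 0
  matrix.filter (fun row => pvMaxOddRun row == best)

-- ===== PRECONDITION & SPEC =====
-- helper for D_ (an input property only; it reaches neither port): the lengths of a
-- row's odd segments — the pieces around/between its even elements, empties included
def pvLens (r : List Int) : List Nat := (r.splitOnP (· % 2 = 0)).map (·.length)

-- On matrices where the globally longest odd run is realised more than once inside a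
-- single row (including the all-even case, where every element boundary realises the
-- zero-length run), A appends that row once per realisation and returns duplicates;
-- B lists each qualifying row exactly once, the intended 'rows with the longest run'.
def D_longest_contiguous_odd_rows (matrix : List (List Int)) : Prop :=
  ∃ r ∈ matrix, 2 ≤ (pvLens r).count ((matrix.flatMap pvLens).foldl max 0)
instance (matrix : List (List Int)) : Decidable (D_longest_contiguous_odd_rows matrix) := by
  unfold D_longest_contiguous_odd_rows; infer_instance

def Spec_longest_contiguous_odd_rows (matrix : List (List Int)) (out : List (List Int)) : Prop := ¬ D_longest_contiguous_odd_rows matrix → out = longest_contiguous_odd_rows_alt matrix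
instance (matrix : List (List Int)) (out : List (List Int)) : Decidable (Spec_longest_contiguous_odd_rows matrix out) := by unfold Spec_longest_contiguous_odd_rows; infer_instance

def pvDiffWitness_longest_contiguous_odd_rows : List (List Int) := [[1, 2, 1]]
def pvDiffWitnessOut_longest_contiguous_odd_rows : (List (List Int)) × (List (List Int)) :=
  ([[1, 2, 1], [1, 2, 1]], [[1, 2, 1]])

-- ===== CLAIM (what is proved, stated in full; the proofs are below) =====
def Claim_unchanged_longest_contiguous_odd_rows : Prop := ∀ (matrix : List (List Int)), Dom_longest_contiguous_odd_rows matrix → Spec_longest_contiguous_odd_rows matrix (longest_contiguous_odd_rows matrix)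
def Claim_changed_longest_contiguous_odd_rows : Prop := Dom_longest_contiguous_odd_rows (pvDiffWitness_longest_contiguous_odd_rows) ∧ D_longest_contiguous_odd_rows (pvDiffWitness_longest_contiguous_odd_rows) ∧ longest_contiguous_odd_rows (pvDiffWitness_longest_contiguous_odd_rows) = pvDiffWitnessOut_longest_contiguous_odd_rows.1 ∧ longest_contiguous_odd_rows_alt (pvDiffWitness_longest_contiguous_odd_rows) = pvDiffWitnessOut_longest_contiguous_odd_rows.2 ∧ pvDiffWitnessOut_longest_contiguous_odd_rows.1 ≠ pvDiffWitnessOut_longest_contiguous_odd_rows.2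
def Claim_exact_longest_contiguous_odd_rows : Prop := ∀ (matrix : List (List Int)), Dom_longest_contiguous_odd_rows matrix → D_longest_contiguous_odd_rows matrix → longest_contiguous_odd_rows matrix ≠ longest_contiguous_odd_rows_alt matrix

-- ===== LEMMAS AND PROOFS =====

-- clean recursive description of A's segment lengths (proof-only)
def pvSegs : List Int → List Int
  | [] => [0]
  | x :: r =>
    if PySem.Int.mod x 2 ≠ 0 then
      match pvSegs r with
      | [] => []          -- unreachable
      | h :: t => (h + 1) :: t
    else 0 :: pvSegs r

-- the Int-valued global maximum, as A's scan carries it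
def pvMI (matrix : List (List Int)) : Int :=
  matrix.foldl (fun m row => (pvSegs row).foldl max m) 0

theorem pvSegs_ne_nil (row : List Int) : pvSegs row ≠ [] := by
  cases row with
  | nil => simp [pvSegs]
  | cons x r =>
    simp only [pvSegs]
    split
    · cases h : pvSegs r with
      | nil => exact absurd h (pvSegs_ne_nil r)
      | cons a t => simp
    · simp

theorem pvSegs_nonneg (row : List Int) : ∀ L ∈ pvSegs row, 0 ≤ L := by
  induction row with
  | nil => intro L hL; simp [pvSegs] at hL; omega
  | cons x r ih =>
    intro L hL
    simp only [pvSegs] at hL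
    split at hL
    · cases h : pvSegs r with
      | nil => exact absurd h (pvSegs_ne_nil r)
      | cons a t =>
        rw [h] at hL
        rcases List.mem_cons.mp hL with h1 | h1
        · have := ih a (by rw [h]; exact List.mem_cons_self)
          omega
        · exact ih L (by rw [h]; exact List.mem_cons_of_mem _ h1)
    · rcases List.mem_cons.mp hL with h1 | h1
      · omega
      · exact ih L h1

-- bump the first segment by n
def pvAdd : Int → List Int → List Int
  | _, [] => []
  | n, h :: t => (h + n) :: t

theorem pvAdd_zero (l : List Int) : pvAdd 0 l = l := by
  cases l <;> simp [pvAdd]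

-- the per-row step on (rows, max_length) for one segment length
def pvStep (row : List Int) (s : List (List Int) × Int) (L : Int) : List (List Int) × Int :=
  if L > s.2 then ([row], L)
  else if L = s.2 then (s.1 ++ [row], s.2)
  else s

-- A's inner loop + row-end step = fold of pvStep over the segment lengths
theorem innerA_eq (rw : List Int) (l : List Int) :
    ∀ (cur : List Int) (rows : List (List Int)) (maxl : Int),
    (let t := l.foldl
        (fun (t : List Int × List (List Int) × Int) x =>
          if PySem.Int.mod x 2 ≠ 0 then
            (t.1 ++ [x], t.2.1, t.2.2)
          else
            if (t.1.length : Int) > t.2.2 then ([], [rw], (t.1.length : Int))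
            else if (t.1.length : Int) = t.2.2 then ([], t.2.1 ++ [rw], t.2.2)
            else ([], t.2.1, t.2.2))
        (cur, rows, maxl)
     if (t.1.length : Int) > t.2.2 then ([rw], (t.1.length : Int))
     else if (t.1.length : Int) = t.2.2 then (t.2.1 ++ [rw], t.2.2)
     else (t.2.1, t.2.2)) =
    (pvAdd (cur.length : Int) (pvSegs l)).foldl (pvStep rw) (rows, maxl) := by
  induction l with
  | nil =>
    intro cur rows maxl
    simp [pvSegs, pvAdd, pvStep, List.foldl]
  | cons x r ih =>
    intro cur rows maxl
    simp only [List.foldl_cons]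
    by_cases hx : PySem.Int.mod x 2 ≠ 0
    · simp only [ne_eq, hx, not_false_eq_true, ite_true]
      have := ih (cur ++ [x]) rows maxl
      simp only at this
      rw [this]
      congr 1
      simp only [pvSegs, ne_eq, hx, not_false_eq_true, ite_true]
      cases h : pvSegs r with
      | nil => exact absurd h (pvSegs_ne_nil r)
      | cons a t =>
        simp [pvAdd]
        ring_nf
    · simp only [ne_eq, hx, ite_false]
      simp only [not_not] at hx
      have hs : (if (cur.length : Int) > maxl then (([] : List Int), [rw], (cur.length : Int))
            else if (cur.length : Int) = maxl then (([] : List Int), rows ++ [rw], maxl)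
            else (([] : List Int), rows, maxl)) =
          (([] : List Int), (pvStep rw (rows, maxl) (cur.length : Int)).1,
            (pvStep rw (rows, maxl) (cur.length : Int)).2) := by
        simp only [pvStep]
        split_ifs <;> rfl
      rw [hs]
      have := ih [] (pvStep rw (rows, maxl) (cur.length : Int)).1
        (pvStep rw (rows, maxl) (cur.length : Int)).2
      simp only [List.length_nil, Int.natCast_zero, pvAdd_zero] at this
      rw [this]
      simp only [pvSegs, hx, if_neg (by simp : ¬ ((0:Int) ≠ 0))]
      cases h : pvSegs r with
      | nil => exact absurd h (pvSegs_ne_nil r)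
      | cons a t =>
        simp [pvAdd, List.foldl_cons]

-- fold max basics
theorem foldl_max_ge (l : List Int) : ∀ m : Int, m ≤ l.foldl max m := by
  induction l with
  | nil => intro m; simp
  | cons a t ih => intro m; exact le_trans (le_max_left m a) (ih (max m a))

theorem foldl_max_mem_le (l : List Int) :
    ∀ m : Int, ∀ x ∈ l, x ≤ l.foldl max m := by
  induction l with
  | nil => intro m x hx; simp at hx
  | cons a t ih =>
    intro m x hx
    rcases List.mem_cons.mp hx with h | h
    · subst h; exact le_trans (le_max_right m x) (foldl_max_ge t _)
    · exact ih _ x h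

theorem foldl_max_eq_init_or_mem (l : List Int) :
    ∀ m : Int, l.foldl max m = m ∨ l.foldl max m ∈ l := by
  induction l with
  | nil => intro m; left; rfl
  | cons a t ih =>
    intro m
    simp only [List.foldl_cons]
    rcases ih (max m a) with h | h
    · rcases max_choice m a with hm | hm
      · left; rw [h, hm]
      · right; rw [h, hm]; exact List.mem_cons_self
    · right; exact List.mem_cons_of_mem _ h

theorem count_eq_zero_of_gt (l : List Int) (m M : Int)
    (h : l.foldl max m < M) : l.count M = 0 := by
  rw [List.count_eq_zero]
  intro hmem
  exact absurd (foldl_max_mem_le l m M hmem) (not_le.mpr h)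

-- fold of pvStep over a lens list, characterized
theorem stepFold (row : List Int) (lens : List Int) :
    ∀ (rows : List (List Int)) (maxl : Int),
    lens.foldl (pvStep row) (rows, maxl) =
      ((if lens.foldl max maxl > maxl then [] else rows) ++
        List.replicate (lens.count (lens.foldl max maxl)) row,
       lens.foldl max maxl) := by
  induction lens with
  | nil => intro rows maxl; simp
  | cons L t ih =>
    intro rows maxl
    simp only [List.foldl_cons]
    have hM := foldl_max_ge t (max maxl L)
    by_cases h1 : L > maxl
    · have hml : max maxl L = L := by omega
      rw [show pvStep row (rows, maxl) L = ([row], L) by simp [pvStep, h1]]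
      rw [ih [row] L]
      simp only [hml] at hM ⊢
      by_cases h2 : t.foldl max L > L
      · have hc : ((L :: t).count (t.foldl max L)) = t.count (t.foldl max L) := by
          rw [List.count_cons]
          simp [show ¬ (L = t.foldl max L) by omega]
        simp only [if_pos h2, if_pos (show t.foldl max L > maxl by omega), hc]
      · have he : t.foldl max L = L := by omega
        have hc : ((L :: t).count (t.foldl max L)) = t.count (t.foldl max L) + 1 := by
          rw [List.count_cons]; simp [he]
        simp only [if_neg h2, if_pos (show t.foldl max L > maxl by omega), hc]
        simp [List.replicate_succ]
    · have hml : max maxl L = maxl := by omega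
      have hM' : maxl ≤ t.foldl max maxl := by rw [hml] at hM; exact hM
      by_cases h2 : L = maxl
      · rw [show pvStep row (rows, maxl) L = (rows ++ [row], maxl) by simp [pvStep, h2]]
        rw [ih (rows ++ [row]) maxl]; simp only [hml]
        by_cases h3 : t.foldl max maxl > maxl
        · have hc : ((L :: t).count (t.foldl max maxl)) = t.count (t.foldl max maxl) := by
            rw [List.count_cons]; simp [show ¬ (L = t.foldl max maxl) by omega]
          simp [if_pos h3, hc]
        · have he : t.foldl max maxl = maxl := by omega
          have hc : ((L :: t).count (t.foldl max maxl)) = t.count (t.foldl max maxl) + 1 := by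
            rw [List.count_cons]; simp [he, h2]
          simp only [if_neg h3, hc]
          simp [List.replicate_succ]
      · rw [show pvStep row (rows, maxl) L = (rows, maxl) by simp [pvStep, h1, h2]]
        rw [ih rows maxl]; simp only [hml]
        have hc : ((L :: t).count (t.foldl max maxl)) = t.count (t.foldl max maxl) := by
          rw [List.count_cons]; simp [show ¬ (L = t.foldl max maxl) by omega]
        simp only [hc]

-- the multiplicity-respecting emission A performs
def pvEmit (matrix : List (List Int)) (M : Int) : List (List Int) :=
  matrix.flatMap (fun row => List.replicate ((pvSegs row).count M) row)

theorem pvM_ge (matrix : List (List Int)) :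
    ∀ m : Int, m ≤ matrix.foldl (fun m row => (pvSegs row).foldl max m) m := by
  induction matrix with
  | nil => intro m; simp
  | cons row rest ih =>
    intro m
    simp only [List.foldl_cons]
    exact le_trans (foldl_max_ge (pvSegs row) m) (ih _)

-- A's outer fold, characterized
theorem outerA (matrix : List (List Int)) :
    ∀ (rows : List (List Int)) (maxl : Int),
    matrix.foldl (fun s row => (pvSegs row).foldl (pvStep row) s) (rows, maxl) =
      ((if matrix.foldl (fun m row => (pvSegs row).foldl max m) maxl > maxl then []
          else rows) ++ pvEmit matrix (matrix.foldl (fun m row => (pvSegs row).foldl max m) maxl),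
       matrix.foldl (fun m row => (pvSegs row).foldl max m) maxl) := by
  induction matrix with
  | nil => intro rows maxl; simp [pvEmit]
  | cons row rest ih =>
    intro rows maxl
    simp only [List.foldl_cons]
    rw [stepFold row (pvSegs row) rows maxl]
    rw [ih _ _]
    have hm1 : maxl ≤ (pvSegs row).foldl max maxl := foldl_max_ge _ _
    have hM1 : (pvSegs row).foldl max maxl ≤
        rest.foldl (fun m row => (pvSegs row).foldl max m) ((pvSegs row).foldl max maxl) :=
      pvM_ge rest _
    refine Prod.ext ?_ rfl
    by_cases hgt : (pvSegs row).foldl max maxl <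
        rest.foldl (fun m row => (pvSegs row).foldl max m) ((pvSegs row).foldl max maxl)
    · have hz : (pvSegs row).count
          (rest.foldl (fun m row => (pvSegs row).foldl max m) ((pvSegs row).foldl max maxl)) = 0 :=
        count_eq_zero_of_gt _ maxl _ hgt
      simp only [pvEmit, List.flatMap_cons, hz, List.replicate_zero, List.nil_append]
      rw [if_pos hgt, if_pos (show maxl <
        rest.foldl (fun m row => (pvSegs row).foldl max m) ((pvSegs row).foldl max maxl) by omega)]
    · have he : rest.foldl (fun m row => (pvSegs row).foldl max m) ((pvSegs row).foldl max maxl)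
          = (pvSegs row).foldl max maxl := by omega
      simp only [pvEmit, List.flatMap_cons, he]
      rw [if_neg (lt_irrefl _)]
      by_cases h2 : (pvSegs row).foldl max maxl > maxl
      · simp
      · simp

theorem A_eq_emit (matrix : List (List Int)) :
    longest_contiguous_odd_rows matrix = pvEmit matrix (pvMI matrix) := by
  unfold longest_contiguous_odd_rows
  have hf : (fun (s : List (List Int) × Int) (row : List Int) =>
      (let t := row.foldl
        (fun (t : List Int × List (List Int) × Int) x =>
          if PySem.Int.mod x 2 ≠ 0 then
            (t.1 ++ [x], t.2.1, t.2.2)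
          else
            if (t.1.length : Int) > t.2.2 then ([], [row], (t.1.length : Int))
            else if (t.1.length : Int) = t.2.2 then ([], t.2.1 ++ [row], t.2.2)
            else ([], t.2.1, t.2.2))
        ([], s.1, s.2)
       if (t.1.length : Int) > t.2.2 then ([row], (t.1.length : Int))
       else if (t.1.length : Int) = t.2.2 then (t.2.1 ++ [row], t.2.2)
       else (t.2.1, t.2.2))) =
      (fun (s : List (List Int) × Int) (row : List Int) =>
        (pvSegs row).foldl (pvStep row) s) := by
    funext s row
    have := innerA_eq row row [] s.1 s.2
    simp only [List.length_nil, Int.natCast_zero, pvAdd_zero] at this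
    simpa using this
  rw [hf, outerA matrix [] 0]
  have : (if matrix.foldl (fun m row => (pvSegs row).foldl max m) 0 > 0 then ([] : List (List Int)) else []) = [] := by
    split_ifs <;> rfl
  simp only [pvMI, this, List.nil_append]

-- B's per-row scan computes the fold-max of the segment lengths
theorem maxOddRun_fold (row : List Int) :
    ∀ (b c : Int), 0 ≤ c → c ≤ b →
    (row.foldl
      (fun (s : Int × Int) x =>
        let cur := if PySem.Int.mod x 2 ≠ 0 then s.2 + 1 else 0
        (max s.1 cur, cur)) (b, c)).1 =
    (pvAdd c (pvSegs row)).foldl max b := by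
  induction row with
  | nil =>
    intro b c _ hcb
    simp only [List.foldl_nil, pvSegs, pvAdd, List.foldl_cons, List.foldl_nil]
    omega
  | cons x r ih =>
    intro b c hc hcb
    simp only [List.foldl_cons]
    by_cases hx : PySem.Int.mod x 2 ≠ 0
    · simp only [ne_eq, hx, not_false_eq_true, ite_true]
      rw [ih (max b (c + 1)) (c + 1) (by omega) (by omega)]
      have hseg : pvSegs (x :: r) = pvAdd 1 (pvSegs r) := by
        simp only [pvSegs, ne_eq, hx, not_false_eq_true, ite_true]
        cases h : pvSegs r with
        | nil => exact absurd h (pvSegs_ne_nil r)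
        | cons a t => simp [pvAdd]
      rw [hseg]
      cases h : pvSegs r with
      | nil => exact absurd h (pvSegs_ne_nil r)
      | cons a t =>
        have ha : 0 ≤ a := pvSegs_nonneg r a (by rw [h]; exact List.mem_cons_self)
        simp only [pvAdd, List.foldl_cons]
        congr 1
        omega
    · have hx0 : ¬ (PySem.Int.mod x 2 ≠ 0) := hx
      rw [if_neg hx0]
      rw [ih (max b 0) 0 le_rfl (by omega), pvAdd_zero]
      have hseg : pvSegs (x :: r) = 0 :: pvSegs r := by
        simp only [pvSegs, ne_eq]
        rw [if_neg hx0]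
      rw [hseg]
      simp only [pvAdd, List.foldl_cons]
      congr 1
      omega

theorem maxOddRun_segs (row : List Int) :
    pvMaxOddRun row = (pvSegs row).foldl max 0 := by
  unfold pvMaxOddRun
  have := maxOddRun_fold row 0 0 le_rfl le_rfl
  rw [this, pvAdd_zero]

theorem foldl_max_shift (l : List Int) :
    ∀ a b : Int, l.foldl max (max a b) = max a (l.foldl max b) := by
  induction l with
  | nil => intro a b; rfl
  | cons x t ih =>
    intro a b
    simp only [List.foldl_cons, max_assoc]
    exact ih a (max b x)

theorem pvM_eq (matrix : List (List Int)) :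
    ∀ m : Int, 0 ≤ m →
    matrix.foldl (fun m row => (pvSegs row).foldl max m) m =
    matrix.foldl (fun b row => max b (pvMaxOddRun row)) m := by
  induction matrix with
  | nil => intro m _; rfl
  | cons row rest ih =>
    intro m hm
    simp only [List.foldl_cons]
    have h1 : (pvSegs row).foldl max m = max m (pvMaxOddRun row) := by
      rw [maxOddRun_segs]
      conv_lhs => rw [show m = max m 0 by omega]
      rw [foldl_max_shift]
    rw [h1]
    exact ih (max m (pvMaxOddRun row)) (by have := le_max_left m (pvMaxOddRun row); omega)

theorem mem_le_pvMI (matrix : List (List Int)) (row : List Int) (h : row ∈ matrix) :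
    pvMaxOddRun row ≤ pvMI matrix := by
  unfold pvMI
  rw [pvM_eq matrix 0 le_rfl, ← List.foldl_map]
  exact foldl_max_mem_le _ 0 _ (List.mem_map_of_mem h)

-- count of the global maximum M in a row's segments vs the row's longest run
theorem count_pos_iff (row : List Int) (M : Int) (hle : pvMaxOddRun row ≤ M) :
    1 ≤ (pvSegs row).count M ↔ pvMaxOddRun row = M := by
  rw [maxOddRun_segs] at hle ⊢
  constructor
  · intro h
    have hmem : M ∈ pvSegs row := List.count_pos_iff.mp (by omega)
    have := foldl_max_mem_le (pvSegs row) 0 M hmem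
    omega
  · intro h
    have hmem : M ∈ pvSegs row := by
      rcases foldl_max_eq_init_or_mem (pvSegs row) 0 with h0 | hmem
      · -- the fold equals the initial 0: the head of pvSegs row is 0 = M
        cases hs : pvSegs row with
        | nil => exact absurd hs (pvSegs_ne_nil row)
        | cons a t =>
          have ha : 0 ≤ a := pvSegs_nonneg row a (by rw [hs]; exact List.mem_cons_self)
          have hale : a ≤ (pvSegs row).foldl max 0 :=
            foldl_max_mem_le _ 0 a (by rw [hs]; exact List.mem_cons_self)
          have haM : a = M := by omega
          rw [← haM]
          exact List.mem_cons_self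
      · rwa [h] at hmem
    exact List.count_pos_iff.mpr hmem

-- bridge: A's Int-valued segment lengths are the cast of the splitOnP lengths
theorem segs_eq_split (r : List Int) :
    pvSegs r = (r.splitOnP (fun x => x % 2 = 0)).map (fun s => (s.length : Int)) := by
  induction r with
  | nil => simp [pvSegs, List.splitOnP_nil]
  | cons x t ih =>
    have hmod : PySem.Int.mod x 2 = x % 2 := PySem.Int.mod_eq_emod_of_pos (by norm_num)
    rw [List.splitOnP_cons]
    by_cases h : x % 2 = 0
    · simp [pvSegs, hmod, h, ih]
    · simp only [pvSegs, ne_eq, hmod, h, not_false_eq_true, ite_true, decide_false,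
        Bool.false_eq_true, if_false]
      cases hs : t.splitOnP (fun x => decide (x % 2 = 0)) with
      | nil => exact absurd hs (List.splitOnP_ne_nil _ t)
      | cons sfst srest =>
        rw [hs] at ih
        rw [ih, List.map_cons]
        simp only [List.modifyHead, List.map_cons, List.length_cons]
        push_cast
        ring_nf

theorem segs_eq_lens (r : List Int) :
    pvSegs r = (pvLens r).map (fun n : Nat => (n : Int)) := by
  rw [segs_eq_split]
  unfold pvLens
  rw [List.map_map]
  rfl

theorem foldl_max_cast (l : List Nat) :
    ∀ m : Nat, ((l.map (fun n : Nat => (n : Int))).foldl max (m : Int)) = ((l.foldl max m : Nat) : Int) := by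
  induction l with
  | nil => intro m; rfl
  | cons a t ih =>
    intro m
    rw [List.map_cons, List.foldl_cons, List.foldl_cons, ← Nat.cast_max]
    exact ih (max m a)

theorem row_max_cast (row : List Int) (m : Nat) :
    (pvSegs row).foldl max (m : Int) = (((pvLens row).foldl max m : Nat) : Int) := by
  rw [segs_eq_lens]
  exact foldl_max_cast _ m

theorem pvMI_eq_cast (matrix : List (List Int)) :
    pvMI matrix = (((matrix.flatMap pvLens).foldl max 0 : Nat) : Int) := by
  unfold pvMI
  suffices h : ∀ m : Nat,
      matrix.foldl (fun m row => (pvSegs row).foldl max m) (m : Int) =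
      (((matrix.flatMap pvLens).foldl max m : Nat) : Int) by
    exact_mod_cast h 0
  induction matrix with
  | nil => intro m; rfl
  | cons row rest ih =>
    intro m
    rw [List.foldl_cons, row_max_cast, List.flatMap_cons, List.foldl_append]
    exact ih _

theorem count_bridge (row : List Int) (matrix : List (List Int)) :
    (pvSegs row).count (pvMI matrix) =
      (pvLens row).count ((matrix.flatMap pvLens).foldl max 0) := by
  rw [segs_eq_lens, pvMI_eq_cast]
  exact List.count_map_of_injective _ _ (fun a b hab => by exact_mod_cast hab) _

-- outside D_, A's emission is exactly B's filter
theorem repl_eq (M : Int) (row : List Int) (hle : pvMaxOddRun row ≤ M)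
    (hc : (pvSegs row).count M ≤ 1) :
    List.replicate ((pvSegs row).count M) row =
      if pvMaxOddRun row == M then [row] else [] := by
  by_cases h : pvMaxOddRun row = M
  · have h1 : 1 ≤ (pvSegs row).count M := (count_pos_iff row M hle).mpr h
    have h2 : (pvSegs row).count M = 1 := by omega
    simp [h2, h]
  · have h1 : ¬ 1 ≤ (pvSegs row).count M := fun hh => h ((count_pos_iff row M hle).mp hh)
    have h2 : (pvSegs row).count M = 0 := by omega
    simp [h2, h]

theorem emit_eq_filter (M : Int) (matrix : List (List Int))
    (hle : ∀ row ∈ matrix, pvMaxOddRun row ≤ M)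
    (hc : ∀ row ∈ matrix, (pvSegs row).count M ≤ 1) :
    pvEmit matrix M = matrix.filter (fun row => pvMaxOddRun row == M) := by
  induction matrix with
  | nil => rfl
  | cons row rest ih =>
    simp only [pvEmit, List.flatMap_cons, List.filter_cons]
    rw [repl_eq M row (hle row List.mem_cons_self) (hc row List.mem_cons_self)]
    have ihr := ih (fun r hr => hle r (List.mem_cons_of_mem _ hr))
      (fun r hr => hc r (List.mem_cons_of_mem _ hr))
    simp only [pvEmit] at ihr
    rw [ihr]
    by_cases h : pvMaxOddRun row = M
    · simp [h]
    · simp [h]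

theorem B_eq_filter (matrix : List (List Int)) :
    longest_contiguous_odd_rows_alt matrix =
      matrix.filter (fun row => pvMaxOddRun row == pvMI matrix) := by
  unfold longest_contiguous_odd_rows_alt
  have : matrix.foldl (fun b row => max b (pvMaxOddRun row)) 0 = pvMI matrix := by
    unfold pvMI; rw [pvM_eq matrix 0 le_rfl]
  simp only [this]

-- inside D_, B's filter is strictly shorter than A's emission
theorem filter_len_le_emit (M : Int) (l : List (List Int))
    (hle : ∀ row ∈ l, pvMaxOddRun row ≤ M) :
    (l.filter (fun row => pvMaxOddRun row == M)).length ≤ (pvEmit l M).length := by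
  induction l with
  | nil => simp [pvEmit]
  | cons row rest ih =>
    have hle' := hle row List.mem_cons_self
    have ih' := ih (fun r hr => hle r (List.mem_cons_of_mem _ hr))
    simp only [pvEmit] at ih'
    simp only [pvEmit, List.flatMap_cons, List.filter_cons, List.length_append,
      List.length_replicate]
    by_cases h : pvMaxOddRun row = M
    · have h1 : 1 ≤ (pvSegs row).count M := (count_pos_iff row M hle').mpr h
      rw [if_pos (show (pvMaxOddRun row == M) = true by simp [h])]
      simp only [List.length_cons]
      omega
    · rw [if_neg (show ¬ ((pvMaxOddRun row == M) = true) by simp [h])]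
      omega

theorem emit_longer (M : Int) (matrix : List (List Int))
    (hle : ∀ row ∈ matrix, pvMaxOddRun row ≤ M)
    (hd : ∃ row ∈ matrix, 2 ≤ (pvSegs row).count M) :
    (matrix.filter (fun row => pvMaxOddRun row == M)).length < (pvEmit matrix M).length := by
  induction matrix with
  | nil => simp at hd
  | cons row rest ih =>
    have hle' := hle row List.mem_cons_self
    have hrest : ∀ r ∈ rest, pvMaxOddRun r ≤ M := fun r hr => hle r (List.mem_cons_of_mem _ hr)
    simp only [pvEmit, List.flatMap_cons, List.filter_cons, List.length_append,
      List.length_replicate]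
    rcases hd with ⟨w, hw, hcw⟩
    rcases List.mem_cons.mp hw with hweq | hwrest
    · subst hweq
      have htl := filter_len_le_emit M rest hrest
      simp only [pvEmit] at htl
      by_cases h : pvMaxOddRun w = M
      · rw [if_pos (show (pvMaxOddRun w == M) = true by simp [h])]
        simp only [List.length_cons]
        omega
      · rw [if_neg (show ¬ ((pvMaxOddRun w == M) = true) by simp [h])]
        omega
    · have hstrict := ih hrest ⟨w, hwrest, hcw⟩
      simp only [pvEmit] at hstrict
      by_cases h : pvMaxOddRun row = M
      · have h1 : 1 ≤ (pvSegs row).count M := (count_pos_iff row M hle').mpr h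
        rw [if_pos (show (pvMaxOddRun row == M) = true by simp [h])]
        simp only [List.length_cons]
        omega
      · rw [if_neg (show ¬ ((pvMaxOddRun row == M) = true) by simp [h])]
        omega

-- ===== VERDICT (by name: the statements are the Claim_ definitions above) =====
theorem longest_contiguous_odd_rows_spec : Claim_unchanged_longest_contiguous_odd_rows := by
  intro matrix _
  unfold Spec_longest_contiguous_odd_rows
  intro hD
  unfold D_longest_contiguous_odd_rows at hD
  simp only [not_exists, not_and, not_le] at hD
  rw [A_eq_emit, B_eq_filter]
  exact emit_eq_filter (pvMI matrix) matrix (fun r hr => mem_le_pvMI matrix r hr)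
    (fun r hr => by have := hD r hr; rw [count_bridge r matrix]; omega)

theorem longest_contiguous_odd_rows_changed : Claim_changed_longest_contiguous_odd_rows := by
  unfold Claim_changed_longest_contiguous_odd_rows; decide

theorem longest_contiguous_odd_rows_tight : Claim_exact_longest_contiguous_odd_rows := by
  intro matrix _ hD
  unfold D_longest_contiguous_odd_rows at hD
  rw [A_eq_emit, B_eq_filter]
  intro heq
  obtain ⟨w, hw, hcw⟩ := hD
  have hcw' : 2 ≤ (pvSegs w).count (pvMI matrix) := by rw [count_bridge w matrix]; exact hcw
  have := emit_longer (pvMI matrix) matrix (fun r hr => mem_le_pvMI matrix r hr) ⟨w, hw, hcw'⟩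
  rw [heq] at this
  omega
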